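-- pv_equiv track=rewrite | github.com/mevdschee/lesspass.py | lesspass/lesspass.py | _insert_string_pseudo_randomly
-- ===== SOURCE A (Python) =====
-- def _insert_string_pseudo_randomly(generated_password, entropy, string):
--     for letter in string:
--         quotient, remainder = divmod(entropy, len(generated_password))
--         generated_password = (
--             generated_password[:remainder] +
--             letter +
--             generated_password[remainder:]
--         )
--         entropy = quotient
--     return generated_password
-- ===== SOURCE B (Python) =====
-- def _insert_string_pseudo_randomly(generated_password, entropy, string):
--     # Mixed-radix decomposition of entropy into the insertion index sequence.
--     n = len(generated_password)
--     m = len(string)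
--     idxs = []
--     for i in range(m):
--         entropy, r = divmod(entropy, n + i)
--         idxs.append(r)
--     # No insertions: the LAST inserted letter ends up at final index idxs[-1];
--     # removing that slot, the previous letter sits at its index among the
--     # remaining slots, and so on.  Select slots in reverse from a free list,
--     # then scatter letters and the original characters into a fixed array.
--     free = list(range(n + m))
--     out = [''] * (n + m)
--     for letter, idx in zip(reversed(string), reversed(idxs)):
--         out[free.pop(idx)] = letter
--     for ch, pos in zip(generated_password, free):
--         out[pos] = ch
--     return ''.join(out)
-- ===== Notes on version B (the rewrite author's own statement) =====
-- stated objective: alternative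
-- what changed: B never performs an insertion: it decomposes entropy into the index sequence, then processes that sequence in reverse, popping each letter's final slot from a free-slot list, and scatters letters and the original characters into a preallocated output array.
import Mathlib
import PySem

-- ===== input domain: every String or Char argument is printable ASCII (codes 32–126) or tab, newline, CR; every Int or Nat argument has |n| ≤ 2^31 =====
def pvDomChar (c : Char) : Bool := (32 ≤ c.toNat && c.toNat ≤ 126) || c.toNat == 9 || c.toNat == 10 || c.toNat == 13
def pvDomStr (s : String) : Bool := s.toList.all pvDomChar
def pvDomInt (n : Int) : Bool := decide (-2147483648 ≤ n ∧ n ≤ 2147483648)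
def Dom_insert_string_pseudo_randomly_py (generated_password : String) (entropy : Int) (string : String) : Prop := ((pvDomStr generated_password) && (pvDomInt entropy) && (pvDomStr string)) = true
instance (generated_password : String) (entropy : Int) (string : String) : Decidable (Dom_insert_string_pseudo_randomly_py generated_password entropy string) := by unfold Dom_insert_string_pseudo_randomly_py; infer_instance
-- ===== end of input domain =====

-- B performs no insertions at all: it pops each letter's final slot from a free-slot list in
-- reverse order and scatters letters and password characters into a preallocated array;
-- equal return value on Pre_ (no speed claim).

-- ===== PORT A =====
def insert_string_pseudo_randomly_py (generated_password : String) (entropy : Int) (string : String) : String :=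
  let r := string.toList.foldl
    (fun (st : List Char × Int) letter =>
      let quotient := PySem.Int.floordiv st.2 (st.1.length : Int)
      let remainder := PySem.Int.mod st.2 (st.1.length : Int)
      (PySem.List.slice st.1 none (some remainder) ++ [letter] ++ PySem.List.slice st.1 (some remainder) none,
       quotient))
    (generated_password.toList, entropy)
  String.ofList r.1

-- ===== PORT B =====
def insert_string_pseudo_randomly_py_alt (generated_password : String) (entropy : Int) (string : String) : String :=
  let n := generated_password.toList.length
  let m := string.toList.length
  -- pass 1: for i in range(m): entropy, r = divmod(entropy, n + i); idxs.append(r)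
  let st := (PySem.List.pyRange 0 (m : Int) 1).foldl
    (fun (acc : Int × List Int) i =>
      (PySem.Int.floordiv acc.1 ((n : Int) + i),
       acc.2 ++ [PySem.Int.mod acc.1 ((n : Int) + i)]))
    (entropy, [])
  -- pass 2: free = list(range(n+m)); out = ['']*(n+m);
  --         for letter, idx in zip(reversed(string), reversed(idxs)): out[free.pop(idx)] = letter
  let r := (string.toList.reverse.zip st.2.reverse).foldl
    (fun (p : List (List Char) × List Int) lc =>
      match PySem.List.pop? p.2 lc.2 with
      | some q => (PySem.List.pySetD p.1 q.1 [lc.1], q.2)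
      | none => p)   -- unreachable inside Pre_: the pop index is always in range
    (List.replicate (n + m) [], PySem.List.pyRange 0 ((n + m : Nat) : Int) 1)
  -- pass 3: for ch, pos in zip(generated_password, free): out[pos] = ch;  return ''.join(out)
  let out := (generated_password.toList.zip r.2).foldl
    (fun (o : List (List Char)) q => PySem.List.pySetD o q.2 [q.1]) r.1
  String.ofList (PySem.Chars.join [] out)

-- ===== PRECONDITION & SPEC =====
-- Pre_ excludes exactly the inputs where Python A raises ZeroDivisionError
-- (empty generated_password with non-empty string); B raises there too.
def Pre_insert_string_pseudo_randomly_py (generated_password : String) (entropy : Int) (string : String) : Prop :=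
  string.toList = [] ∨ generated_password.toList ≠ []
instance (generated_password : String) (entropy : Int) (string : String) : Decidable (Pre_insert_string_pseudo_randomly_py generated_password entropy string) := by unfold Pre_insert_string_pseudo_randomly_py; infer_instance

def pvWitness_insert_string_pseudo_randomly_py : String × Int × String := ("ab", 5, "xyz")

def Spec_insert_string_pseudo_randomly_py (generated_password : String) (entropy : Int) (string : String) (out : String) : Prop := out = insert_string_pseudo_randomly_py_alt generated_password entropy string
instance (generated_password : String) (entropy : Int) (string : String) (out : String) : Decidable (Spec_insert_string_pseudo_randomly_py generated_password entropy string out) := by unfold Spec_insert_string_pseudo_randomly_py; infer_instance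

-- ===== CLAIM (what is proved, stated in full; the proofs are below) =====
def Claim_equal_insert_string_pseudo_randomly_py : Prop := ∀ (generated_password : String) (entropy : Int) (string : String), Dom_insert_string_pseudo_randomly_py generated_password entropy string → Pre_insert_string_pseudo_randomly_py generated_password entropy string → Spec_insert_string_pseudo_randomly_py generated_password entropy string (insert_string_pseudo_randomly_py generated_password entropy string)

-- ===== LEMMAS AND PROOFS =====

/-- Reference form of the entropy decomposition: starting entropy `e` and base `b`, `k` divmod steps. -/
def pvIdxs (e : Int) (b : Int) : Nat → Int × List Int
  | 0 => (e, [])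
  | k+1 =>
    let p := pvIdxs (PySem.Int.floordiv e b) (b + 1) k
    (p.1, PySem.Int.mod e b :: p.2)

/-- Named Nat→Int cast, to keep port-side Int lists syntactically controlled. -/
def pvCast (j : Nat) : Int := (j : Int)

/-- Slot-index shift performed by inserting a new slot at position `i`. -/
def pvShift (i j : Nat) : Nat := if j < i then j else j + 1

/-- Spec form of B's letter phase: pop the `i`-th free slot, write the letter there. -/
def pvAsmL : List (List Char) → List Nat → List (Char × Nat) → List (List Char) × List Nat
  | out, free, [] => (out, free)
  | out, free, (c, i) :: t => pvAsmL (out.set (free.getD i 0) [c]) (free.eraseIdx i) t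

/-- Spec form of B's fill phase. -/
def pvFill (out : List (List Char)) (ps : List (Char × Nat)) : List (List Char) :=
  ps.foldl (fun o q => o.set q.2 [q.1]) out

/-- Pure insertion semantics (what A computes). -/
def pvIns (gp : List Char) (ps : List (Char × Nat)) : List Char :=
  ps.foldl (fun acc q => acc.insertIdx q.2 q.1) gp

/-- Forward validity of insertion indices: at step with current length `b`, the index is `< b`. -/
def pvFval : Nat → List (Char × Nat) → Prop
  | _, [] => True
  | b, (_, i) :: t => i < b ∧ pvFval (b + 1) t

/-- Pop validity: processing the list against a free list of length `L`. -/
def pvOK : Nat → List (Char × Nat) → Prop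
  | _, [] => True
  | L, (_, i) :: t => i < L ∧ pvOK (L - 1) t

theorem pv_fold_idxs (n : Int) (k : Nat) : ∀ (a e : Int) (acc : List Int),
    (PySem.List.pyRange a (a + (k : Int)) 1).foldl
      (fun (p : Int × List Int) i =>
        (PySem.Int.floordiv p.1 (n + i), p.2 ++ [PySem.Int.mod p.1 (n + i)])) (e, acc)
    = ((pvIdxs e (n + a) k).1, acc ++ (pvIdxs e (n + a) k).2) := by
  induction k with
  | zero =>
    intro a e acc
    rw [show a + ((0 : Nat) : Int) = a by omega, PySem.List.pyRange_one_eq_nil le_rfl]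
    simp [pvIdxs]
  | succ k ih =>
    intro a e acc
    rw [PySem.List.pyRange_one_cons (by omega : a < a + ((k+1 : Nat) : Int))]
    simp only [List.foldl_cons]
    rw [show a + ((k+1 : Nat) : Int) = (a + 1) + (k : Int) by push_cast; omega]
    rw [ih (a+1) (PySem.Int.floordiv e (n + a)) (acc ++ [PySem.Int.mod e (n + a)])]
    simp [pvIdxs, show n + (a + 1) = n + a + 1 by omega]

theorem pv_len_idxs (k : Nat) : ∀ (e b : Int), ((pvIdxs e b k).2).length = k := by
  induction k with
  | zero => intro e b; simp [pvIdxs]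
  | succ k ih => intro e b; simp [pvIdxs, ih]

theorem pv_idxs_nonneg (k : Nat) : ∀ (e : Int) (b : Nat), 0 < b →
    ∀ x ∈ (pvIdxs e (b : Int) k).2, 0 ≤ x := by
  induction k with
  | zero => intro e b _ x hx; simp [pvIdxs] at hx
  | succ k ih =>
    intro e b hb x hx
    simp only [pvIdxs, List.mem_cons] at hx
    rcases hx with h | h
    · subst h; exact PySem.Int.mod_nonneg _ (by exact_mod_cast hb)
    · have := ih (PySem.Int.floordiv e b) (b + 1) (by omega) x
      rw [show ((b : Int) + 1) = ((b + 1 : Nat) : Int) by push_cast; ring] at h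
      exact this h

theorem pv_idxs_fval (k : Nat) : ∀ (cs : List Char), cs.length = k → ∀ (e : Int) (b : Nat), 0 < b →
    pvFval b (cs.zip (((pvIdxs e (b : Int) k).2).map Int.toNat)) := by
  induction k with
  | zero => intro cs h e b _; simp [pvIdxs, List.length_eq_zero_iff.mp h, pvFval]
  | succ k ih =>
    intro cs h e b hb
    cases cs with
    | nil => simp at h
    | cons c t =>
      simp only [pvIdxs, List.map_cons, List.zip_cons_cons, pvFval]
      constructor
      · have h1 := PySem.Int.mod_nonneg e (b := (b : Int)) (by exact_mod_cast hb)
        have h2 := PySem.Int.mod_lt e (b := (b : Int)) (by exact_mod_cast hb)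
        omega
      · have := ih t (by simpa using h) (PySem.Int.floordiv e b) (b + 1) (by omega)
        rw [show ((b : Int) + 1) = ((b + 1 : Nat) : Int) by push_cast; ring]
        exact this

theorem pv_insertIdx_eq {α : Type} (xs : List α) (p : Nat) (v : α) (h : p ≤ xs.length) :
    xs.insertIdx p v = xs.take p ++ v :: xs.drop p := by
  induction xs generalizing p with
  | nil =>
    have hp : p = 0 := by simpa using h
    subst hp; simp
  | cons x t ih =>
    cases p with
    | zero => simp
    | succ p => simp [List.insertIdx_succ_cons, ih p (by simpa using h)]

/-- One A-step (slice splice at `e % len`) is a pure `insertIdx`. -/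
theorem pv_step (gp : List Char) (e : Int) (c : Char) (h : gp ≠ []) :
    PySem.List.slice gp none (some (PySem.Int.mod e (gp.length : Int))) ++ [c] ++
      PySem.List.slice gp (some (PySem.Int.mod e (gp.length : Int))) none
    = gp.insertIdx (PySem.Int.mod e (gp.length : Int)).toNat c := by
  have hlen : (0 : Int) < (gp.length : Int) := by
    have := List.length_pos_iff.mpr h; exact_mod_cast this
  have h0 : 0 ≤ PySem.Int.mod e (gp.length : Int) := PySem.Int.mod_nonneg _ hlen
  have hlt : PySem.Int.mod e (gp.length : Int) < (gp.length : Int) := PySem.Int.mod_lt _ hlen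
  rw [PySem.List.slice_to _ h0, PySem.List.slice_from _ h0,
      pv_insertIdx_eq _ _ _ (by omega)]
  simp [List.append_assoc]

/-- A's fold is pure insertion along the decomposed index sequence. -/
theorem pv_A_eq_ins (cs : List Char) : ∀ (gp : List Char) (e : Int), gp ≠ [] →
    (cs.foldl
      (fun (st : List Char × Int) letter =>
        (PySem.List.slice st.1 none (some (PySem.Int.mod st.2 (st.1.length : Int))) ++ [letter] ++
           PySem.List.slice st.1 (some (PySem.Int.mod st.2 (st.1.length : Int))) none,
         PySem.Int.floordiv st.2 (st.1.length : Int))) (gp, e)).1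
    = pvIns gp (cs.zip (((pvIdxs e (gp.length : Int) cs.length).2).map Int.toNat)) := by
  induction cs with
  | nil => intro gp e h; simp [pvIns, pvIdxs]
  | cons c t ih =>
    intro gp e h
    have hlen : (0 : Int) < (gp.length : Int) := by
      have := List.length_pos_iff.mpr h; exact_mod_cast this
    have h0 : 0 ≤ PySem.Int.mod e (gp.length : Int) := PySem.Int.mod_nonneg _ hlen
    have hlt : PySem.Int.mod e (gp.length : Int) < (gp.length : Int) := PySem.Int.mod_lt _ hlen
    simp only [List.foldl_cons, List.length_cons, pvIdxs, List.map_cons, List.zip_cons_cons, pvIns]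
    rw [pv_step gp e c h]
    have hlen1 : (gp.insertIdx (PySem.Int.mod e (gp.length : Int)).toNat c).length = gp.length + 1 := by
      rw [List.length_insertIdx]; split <;> omega
    have hne : gp.insertIdx (PySem.Int.mod e (gp.length : Int)).toNat c ≠ [] := by
      intro hnil; rw [hnil] at hlen1; simp at hlen1
    have := ih (gp.insertIdx (PySem.Int.mod e (gp.length : Int)).toNat c) (PySem.Int.floordiv e (gp.length : Int)) hne
    rw [pvIns] at this
    rw [this, hlen1]
    rw [show ((gp.length + 1 : Nat) : Int) = (gp.length : Int) + 1 by push_cast; ring]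

-- ---- structural helper lemmas for the slot simulation ----

theorem pv_set_insertIdx {α : Type} (out : List α) (i p : Nat) (v w : α)
    (_hp : p < out.length) (hi : i ≤ out.length) :
    (out.insertIdx i v).set (pvShift i p) w = (out.set p w).insertIdx i v := by
  apply List.ext_getElem
  · simp [List.length_insertIdx, hi]
  · intro k h1 h2
    simp only [List.getElem_set, List.getElem_insertIdx, pvShift] at *
    split_ifs <;> first | rfl | (exfalso; omega) | (simp_all; omega)

theorem pv_eraseIdx_map {α β : Type} (f : α → β) (xs : List α) : ∀ (i : Nat),
    (xs.map f).eraseIdx i = (xs.eraseIdx i).map f := by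
  induction xs with
  | nil => intro i; simp
  | cons x t ih =>
    intro i
    cases i with
    | zero => simp
    | succ i =>
      simp only [List.map_cons, List.eraseIdx_cons_succ]
      rw [ih i]

theorem pv_erase_range (L i : Nat) (h : i < L) :
    (List.range L).eraseIdx i = (List.range (L - 1)).map (pvShift i) := by
  apply List.ext_getElem
  · simp only [List.length_eraseIdx, List.length_map, List.length_range]
    split_ifs <;> omega
  · intro k h1 h2
    have hk : k < L - 1 := by simpa using h2
    simp only [List.getElem_eraseIdx, List.getElem_map, List.getElem_range, pvShift]
    split_ifs <;> omega

theorem pv_set_replicate (L i : Nat) (x v : List Char) (h : i < L) :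
    (List.replicate L x).set i v = (List.replicate (L - 1) x).insertIdx i v := by
  apply List.ext_getElem
  · simp only [List.length_set, List.length_replicate, List.length_insertIdx]
    split_ifs <;> omega
  · intro k h1 h2
    simp only [List.getElem_set, List.getElem_insertIdx, List.getElem_replicate]
    split_ifs <;> first | rfl | omega

theorem pv_map_insertIdx {α β : Type} (f : α → β) (xs : List α) : ∀ (p : Nat) (v : α),
    (xs.insertIdx p v).map f = (xs.map f).insertIdx p (f v) := by
  induction xs with
  | nil => intro p v; cases p <;> simp [List.insertIdx]
  | cons x t ih =>
    intro p v
    cases p with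
    | zero => simp
    | succ p => simp [List.insertIdx_succ_cons, ih p v]

theorem pv_zip_reverse {α β : Type} (xs : List α) : ∀ (ys : List β), xs.length = ys.length →
    xs.reverse.zip ys.reverse = (xs.zip ys).reverse := by
  induction xs with
  | nil => intro ys h; simp
  | cons x t ih =>
    intro ys h
    cases ys with
    | nil => simp at h
    | cons y u =>
      simp only [List.reverse_cons, List.zip_cons_cons]
      rw [List.zip_append (by simpa using h), ih u (by simpa using h)]
      simp

-- ---- pvAsmL invariants ----

theorem pv_asmL_out_length : ∀ (rp : List (Char × Nat)) (out : List (List Char)) (free : List Nat),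
    ((pvAsmL out free rp).1).length = out.length := by
  intro rp
  induction rp with
  | nil => intro out free; simp [pvAsmL]
  | cons q t ih =>
    intro out free
    obtain ⟨c, i⟩ := q
    simp [pvAsmL, ih]

theorem pv_asmL_free_subset : ∀ (rp : List (Char × Nat)) (out : List (List Char)) (free : List Nat)
    (j : Nat), j ∈ (pvAsmL out free rp).2 → j ∈ free := by
  intro rp
  induction rp with
  | nil => intro out free j h; simpa [pvAsmL] using h
  | cons q t ih =>
    intro out free j h
    obtain ⟨c, i⟩ := q
    simp only [pvAsmL] at h
    exact List.eraseIdx_subset (ih _ _ j h)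

/-- SIMULATION: inserting a fresh slot at `i` (and shifting the free list accordingly)
commutes with the whole letter phase. -/
theorem pv_asmL_sim : ∀ (rp : List (Char × Nat)) (out : List (List Char)) (free : List Nat)
    (i : Nat) (v : List Char), pvOK free.length rp → (∀ j ∈ free, j < out.length) →
    i ≤ out.length →
    pvAsmL (out.insertIdx i v) (free.map (pvShift i)) rp
      = ((pvAsmL out free rp).1.insertIdx i v, (pvAsmL out free rp).2.map (pvShift i)) := by
  intro rp
  induction rp with
  | nil => intro out free i v _ _ _; simp [pvAsmL]
  | cons q t ih =>
    intro out free i v hOK hfree hi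
    obtain ⟨c, j⟩ := q
    obtain ⟨hj, hOK'⟩ := hOK
    have hgd : (free.map (pvShift i)).getD j 0 = pvShift i free[j] := by
      rw [List.getD_eq_getElem _ _ (by simpa using hj), List.getElem_map]
    have hgd' : free.getD j 0 = free[j] := List.getD_eq_getElem _ _ hj
    simp only [pvAsmL, hgd, hgd']
    rw [pv_set_insertIdx out i free[j] v [c] (hfree _ (List.getElem_mem hj)) hi,
        pv_eraseIdx_map]
    exact ih (out.set free[j] [c]) (free.eraseIdx j) i v
      (by rw [List.length_eraseIdx]; simp [hj]; simpa using hOK')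
      (fun x hx => by rw [List.length_set]; exact hfree x (List.eraseIdx_subset hx))
      (by simpa using hi)

/-- The same simulation for the fill phase. -/
theorem pv_fill_sim (gp : List Char) : ∀ (out : List (List Char)) (free : List Nat)
    (i : Nat) (v : List Char), (∀ j ∈ free, j < out.length) → i ≤ out.length →
    pvFill (out.insertIdx i v) (gp.zip (free.map (pvShift i)))
      = (pvFill out (gp.zip free)).insertIdx i v := by
  induction gp with
  | nil => intro out free i v _ _; simp [pvFill]
  | cons c t ih =>
    intro out free i v hfree hi
    cases free with
    | nil => simp [pvFill]
    | cons f fs =>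
      simp only [List.map_cons, List.zip_cons_cons, pvFill, List.foldl_cons]
      rw [pv_set_insertIdx out i f v [c] (hfree f (by simp)) hi]
      exact ih (out.set f [c]) fs i v
        (fun x hx => by rw [List.length_set]; exact hfree x (by simp [hx]))
        (by simpa using hi)

-- ---- validity bookkeeping ----

theorem pv_fval_append (u : List (Char × Nat)) : ∀ (b : Nat) (c : Char) (i : Nat),
    pvFval b (u ++ [(c, i)]) ↔ pvFval b u ∧ i < b + u.length := by
  induction u with
  | nil => intro b c i; simp [pvFval]
  | cons q t ih =>
    intro b c i
    obtain ⟨c', j⟩ := q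
    simp only [List.cons_append, pvFval, ih (b + 1) c i, List.length_cons]
    constructor
    · rintro ⟨h1, h2, h3⟩; exact ⟨⟨h1, h2⟩, by omega⟩
    · rintro ⟨⟨h1, h2⟩, h3⟩; exact ⟨h1, h2, by omega⟩

theorem pv_ok_append (u : List (Char × Nat)) : ∀ (L : Nat) (c : Char) (i : Nat),
    (pvOK L u ∧ i < L - u.length) → pvOK L (u ++ [(c, i)]) := by
  induction u with
  | nil => intro L c i h; simp [pvOK]; omega
  | cons q t ih =>
    intro L c i h
    obtain ⟨c', j⟩ := q
    obtain ⟨⟨h1, h2⟩, h3⟩ := h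
    exact ⟨h1, ih (L - 1) c i ⟨h2, by simp at h3 ⊢; omega⟩⟩

theorem pv_fval_ok (ps : List (Char × Nat)) : ∀ (b : Nat), pvFval b ps →
    pvOK (b + ps.length) ps.reverse := by
  induction ps with
  | nil => intro b _; simp [pvOK]
  | cons q t ih =>
    intro b h
    obtain ⟨c, i⟩ := q
    obtain ⟨h1, h2⟩ := h
    simp only [List.reverse_cons]
    apply pv_ok_append
    constructor
    · have := ih (b + 1) h2
      rw [show b + ((c, i) :: t).length = (b + 1) + t.length by simp; omega]
      simpa using this
    · simp; omega

-- ---- fill phase on an untouched range produces the password itself ----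

theorem pv_fill_base (gp : List Char) : ∀ (pre : List (List Char)),
    pvFill (pre ++ List.replicate gp.length []) (gp.zip (List.range' pre.length gp.length))
      = pre ++ gp.map (fun c => [c]) := by
  induction gp with
  | nil => intro pre; simp [pvFill]
  | cons c t ih =>
    intro pre
    simp only [List.length_cons, List.range'_succ, List.zip_cons_cons, pvFill, List.foldl_cons,
      List.replicate_succ]
    have hset : (pre ++ [] :: List.replicate t.length []).set pre.length [c]
        = (pre ++ [[c]]) ++ List.replicate t.length [] := by
      rw [List.set_append_right _ _ le_rfl]
      simp
    rw [hset]
    have h2 := ih (pre ++ [[c]])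
    simp only [pvFill, List.length_append, List.length_cons, List.length_nil,
      List.append_assoc, List.singleton_append] at h2 ⊢
    rw [h2]
    simp

/-- MAIN: reverse slot selection from a fresh range, then fill, equals pure insertion. -/
theorem pv_main : ∀ (rp : List (Char × Nat)) (gp : List Char),
    pvFval gp.length rp.reverse →
    pvFill ((pvAsmL (List.replicate (gp.length + rp.length) [])
                    (List.range (gp.length + rp.length)) rp).1)
           (gp.zip ((pvAsmL (List.replicate (gp.length + rp.length) [])
                    (List.range (gp.length + rp.length)) rp).2))
      = (pvIns gp rp.reverse).map (fun c => [c]) := by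
  intro rp
  induction rp with
  | nil =>
    intro gp _
    simp only [pvAsmL, List.length_nil, Nat.add_zero, pvIns]
    have := pv_fill_base gp []
    simpa [List.range_eq_range'] using this
  | cons q t ih =>
    intro gp hval
    obtain ⟨c, i⟩ := q
    have hval' := hval
    rw [List.reverse_cons, pv_fval_append] at hval'
    obtain ⟨hvt, hib⟩ := hval'
    simp only [List.length_reverse] at hib
    have hiL : i < gp.length + t.length + 1 := by omega
    have hgd : (List.range (gp.length + (t.length + 1))).getD i 0 = i := by
      have hlt : i < (List.range (gp.length + (t.length + 1))).length := by
        simp only [List.length_range]; omega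
      rw [List.getD_eq_getElem _ _ hlt, List.getElem_range]
    simp only [List.length_cons, pvAsmL, hgd]
    rw [show gp.length + (t.length + 1) = (gp.length + t.length) + 1 by omega]
    rw [pv_set_replicate _ i [] [c] (by omega), pv_erase_range _ i (by omega)]
    simp only [Nat.add_sub_cancel]
    have hOK : pvOK (List.range (gp.length + t.length)).length t := by
      have := pv_fval_ok t.reverse gp.length (by simpa using hvt)
      simpa using this
    rw [pv_asmL_sim t _ _ i [c] hOK
      (fun j hj => by simp only [List.length_replicate]; exact List.mem_range.mp hj)
      (by simp; omega)]
    rw [pv_fill_sim gp _ _ i [c]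
      (fun j hj => by
        rw [pv_asmL_out_length, List.length_replicate]
        exact List.mem_range.mp (pv_asmL_free_subset t _ _ j hj))
      (by rw [pv_asmL_out_length, List.length_replicate]; omega)]
    rw [ih gp (by simpa using hvt)]
    simp only [List.reverse_cons, pvIns, List.foldl_append, List.foldl_cons, List.foldl_nil]
    rw [pv_map_insertIdx]

-- ---- bridging the B port's Int-valued folds to the Nat-valued spec ----

theorem pv_pop_cast (free : List Nat) (j : Nat) (hj : j < free.length) :
    PySem.List.pop? (free.map pvCast) (pvCast j)
      = some (pvCast free[j], (free.eraseIdx j).map pvCast) := by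
  simp only [pvCast]
  rw [PySem.List.pop?_natCast (free.map pvCast) j (by simpa using hj),
      List.getElem_map, pv_eraseIdx_map]
  simp [pvCast]

theorem pv_pySetD_cast (out : List (List Char)) (p : Nat) (v : List Char) :
    PySem.List.pySetD out (pvCast p) v = out.set p v := by
  simp only [pvCast, PySem.List.pySetD_natCast]

theorem pv_port_asmL : ∀ (rp : List (Char × Nat)) (out : List (List Char)) (free : List Nat),
    pvOK free.length rp →
    ((rp.map (fun q => (q.1, pvCast q.2))).foldl
      (fun (p : List (List Char) × List Int) lc =>
        match PySem.List.pop? p.2 lc.2 with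
        | some q => (PySem.List.pySetD p.1 q.1 [lc.1], q.2)
        | none => p)
      (out, free.map pvCast))
    = ((pvAsmL out free rp).1, (pvAsmL out free rp).2.map pvCast) := by
  intro rp
  induction rp with
  | nil => intro out free _; simp [pvAsmL]
  | cons q t ih =>
    intro out free hOK
    obtain ⟨c, j⟩ := q
    obtain ⟨hj, hOK'⟩ := hOK
    simp only [List.map_cons, List.foldl_cons]
    rw [pv_pop_cast free j hj]
    simp only [pv_pySetD_cast]
    have := ih (out.set free[j] [c]) (free.eraseIdx j)
      (by rw [List.length_eraseIdx]; simp [hj]; simpa using hOK')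
    simp only [pvAsmL, List.getD_eq_getElem free 0 hj]
    exact this

theorem pv_port_fill (gp : List Char) : ∀ (out : List (List Char)) (free : List Nat),
    (gp.zip (free.map pvCast)).foldl
      (fun (o : List (List Char)) q => PySem.List.pySetD o q.2 [q.1]) out
    = pvFill out (gp.zip free) := by
  induction gp with
  | nil => intro out free; simp [pvFill]
  | cons c t ih =>
    intro out free
    cases free with
    | nil => simp [pvFill]
    | cons f fs =>
      simp only [List.map_cons, List.zip_cons_cons, List.foldl_cons, pvFill, pv_pySetD_cast]
      exact ih (out.set f [c]) fs

theorem pv_pyRange_cast (k : Nat) :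
    PySem.List.pyRange 0 (k : Int) 1 = (List.range k).map pvCast := by
  rw [PySem.List.pyRange_one]
  have h1 : ((k : Int) - 0).toNat = k := by omega
  rw [h1]
  exact List.map_congr_left fun a _ => by simp [pvCast]

-- ===== VERDICT (by name: the statement is the Claim_ definition above) =====
theorem insert_string_pseudo_randomly_py_spec : Claim_equal_insert_string_pseudo_randomly_py := by
  intro gp e s _ hpre
  unfold Spec_insert_string_pseudo_randomly_py
  unfold insert_string_pseudo_randomly_py insert_string_pseudo_randomly_py_alt
  simp only []
  have hfold := pv_fold_idxs (gp.toList.length : Int) s.toList.length 0 e []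
  simp only [zero_add, add_zero, List.nil_append] at hfold
  rw [hfold]
  rcases hpre with hs | hne
  · -- string == "": both sides are the untouched password
    simp only [hs, List.length_nil, List.foldl_nil, pvIdxs, List.reverse_nil,
      List.zip_nil_right, Nat.add_zero]
    rw [pv_pyRange_cast, pv_port_fill, List.range_eq_range']
    have hb := pv_fill_base gp.toList []
    simp only [List.nil_append, List.length_nil] at hb
    rw [hb, PySem.Chars.join_nil_singletons]
  · -- general case: password nonempty
    have hn : 0 < gp.toList.length := List.length_pos_iff.mpr hne
    set n := gp.toList.length with hn_def
    set m := s.toList.length with hm_def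
    set idxs := (pvIdxs e (n : Int) m).2 with hidxs
    set natIdxs := idxs.map Int.toNat with hnat
    set pairs := s.toList.zip natIdxs with hpairs
    have hlenidxs : idxs.length = m := pv_len_idxs m e (n : Int)
    have hcast : natIdxs.map pvCast = idxs := by
      rw [hnat, List.map_map]
      conv_rhs => rw [← List.map_id idxs]
      exact List.map_congr_left fun x hx => by
        simp [pvCast, Function.comp, Int.toNat_of_nonneg (pv_idxs_nonneg m e n hn x hx)]
    have hzip : s.toList.zip idxs = pairs.map (fun q => (q.1, pvCast q.2)) := by
      rw [← hcast, hpairs]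
      conv_lhs => rw [show s.toList = s.toList.map id from (List.map_id _).symm]
      rw [List.zip_map]
      exact List.map_congr_left fun q _ => by cases q; rfl
    have hrev : s.toList.reverse.zip idxs.reverse
        = pairs.reverse.map (fun q => (q.1, pvCast q.2)) := by
      rw [pv_zip_reverse _ _ (by rw [hlenidxs, hm_def]), hzip]
      simp
    have hfval : pvFval n pairs := pv_idxs_fval m s.toList rfl e n hn
    have hplen : pairs.length = m := by
      rw [hpairs, List.length_zip, hnat, List.length_map, hlenidxs]
      simp [hm_def]
    have hOK : pvOK (List.range (n + m)).length pairs.reverse := by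
      rw [List.length_range]
      have := pv_fval_ok pairs n hfval
      rwa [hplen] at this
    rw [hrev, pv_pyRange_cast, pv_port_asmL pairs.reverse _ _ hOK, pv_port_fill]
    have hmain := pv_main pairs.reverse gp.toList (by simpa [hplen] using hfval)
    rw [List.length_reverse, hplen] at hmain
    rw [hmain]
    simp only [List.reverse_reverse]
    rw [PySem.Chars.join_nil_singletons]
    have hA := pv_A_eq_ins s.toList gp.toList e hne
    rw [hA]
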